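-- pv_equiv track=rewrite | github.com/kartAI/Atlas | backend/chunker.py | _group_paragraphs_into_children
-- ===== SOURCE A (Python) =====
-- CHILD_CHUNK_TARGET          = 1200   # TUNE — target size of each child chunk
--
-- CHILD_OVERLAP_CHARS         = 150    # TUNE — overlap between consecutive child chunks
--
-- def _group_paragraphs_into_children(
--     paragraphs:     list[str],
--     target_size:    int = CHILD_CHUNK_TARGET,
--     overlap_chars:  int = CHILD_OVERLAP_CHARS,
-- ) -> list[str]:
--     """
--     Greedily accumulate paragraphs until target_size is reached, then flush.
--     Each subsequent group starts with overlap_chars from the end of the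
--     previous group to preserve cross-boundary context.
--     """
--     if not paragraphs:
--         return []
--
--     groups: list[str] = []
--     current_parts: list[str] = []
--     current_len   = 0
--     overlap_prefix = ""  # appended to the start of the next group
--
--     for para in paragraphs:
--         para_len = len(para)
--
--         if current_len + para_len > target_size and current_parts:
--             # Flush current group
--             joined = "\n\n".join(current_parts)
--             group_text = (overlap_prefix + "\n\n" + joined) if overlap_prefix else joined
--             groups.append(group_text.strip())
--
--             # Compute overlap for the next group
--             overlap_prefix = joined[-overlap_chars:] if len(joined) > overlap_chars else joined
--
--             current_parts = [para]
--             current_len   = para_len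
--         else:
--             current_parts.append(para)
--             current_len += para_len
--
--     # Flush final group
--     if current_parts:
--         joined = "\n\n".join(current_parts)
--         group_text = (overlap_prefix + "\n\n" + joined) if (overlap_prefix and groups) else joined
--         groups.append(group_text.strip())
--
--     return [g for g in groups if g.strip()]
-- ===== SOURCE B (Python) =====
-- CHILD_CHUNK_TARGET = 1200
-- CHILD_OVERLAP_CHARS = 150
--
-- def _group_paragraphs_into_children(
--     paragraphs,
--     target_size=CHILD_CHUNK_TARGET,
--     overlap_chars=CHILD_OVERLAP_CHARS,
-- ):
--     """Two phases: first cut the paragraph list into greedy groups by index,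
--     then join each group and prepend the previous group's overlap tail."""
--     n = len(paragraphs)
--     if n == 0:
--         return []
--
--     # Phase 1: group texts, one greedy inner walk per group.
--     joins = []
--     i = 0
--     while i < n:
--         size = len(paragraphs[i])
--         j = i + 1
--         while j < n and size + len(paragraphs[j]) <= target_size:
--             size += len(paragraphs[j])
--             j += 1
--         joins.append("\n\n".join(paragraphs[i:j]))
--         i = j
--
--     # Phase 2: prepend overlap from the previous group's own joined text.
--     out = []
--     prev = None
--     for text in joins:
--         if prev is None:
--             cur = text
--         else:
--             ov = prev if len(prev) <= overlap_chars else prev[-overlap_chars:]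
--             cur = (ov + "\n\n" + text) if ov else text
--         out.append(cur.strip())
--         prev = text
--
--     return [g for g in out if g.strip()]
-- ===== Notes on version B (the rewrite author's own statement) =====
-- stated objective: alternative
-- what changed: Replaces A's single-pass loop carrying parts/length/overlap accumulator state with two separate phases: an index-based nested walk that cuts the paragraph list into contiguous greedy groups, then a second pass that joins each group and prepends the previous group's own overlap tail.
import Mathlib
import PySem

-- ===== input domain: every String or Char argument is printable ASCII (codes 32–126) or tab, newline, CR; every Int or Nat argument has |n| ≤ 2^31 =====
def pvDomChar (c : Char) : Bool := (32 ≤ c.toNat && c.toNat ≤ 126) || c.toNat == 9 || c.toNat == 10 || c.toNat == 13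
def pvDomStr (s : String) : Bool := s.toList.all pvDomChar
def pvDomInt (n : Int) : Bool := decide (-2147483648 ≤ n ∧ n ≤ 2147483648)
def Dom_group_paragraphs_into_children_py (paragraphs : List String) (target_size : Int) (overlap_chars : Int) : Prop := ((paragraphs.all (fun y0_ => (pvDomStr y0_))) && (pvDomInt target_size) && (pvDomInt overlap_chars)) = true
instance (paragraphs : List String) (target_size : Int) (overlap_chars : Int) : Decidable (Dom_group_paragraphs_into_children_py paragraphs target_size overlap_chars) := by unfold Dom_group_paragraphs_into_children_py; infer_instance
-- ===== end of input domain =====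

-- B splits A's single accumulator loop into two phases (index-based grouping, then overlap joining); return values proved equal on all inputs.


-- ===== PORT A =====
-- A's for-loop over `paragraphs`; state = (groups, current_parts, current_len, overlap_prefix).
-- Python's locals para_len/joined/group_text are inlined; `if s:` truthiness is `s ≠ ""`.
def aLoop (ts oc : Int) (paras : List String) (groups cur : List String) (clen : Int) (ov : String) : List String × List String × String :=
  match paras with
  | [] => (groups, cur, ov)
  | p :: rest =>
    if clen + PySem.Str.len p > ts ∧ cur ≠ [] then
      aLoop ts oc rest
        (groups ++ [PySem.Str.strip
          (if ov ≠ "" then ov ++ "\n\n" ++ PySem.Str.join "\n\n" cur else PySem.Str.join "\n\n" cur)])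
        [p] (PySem.Str.len p)
        (if PySem.Str.len (PySem.Str.join "\n\n" cur) > oc
         then PySem.Str.slice (PySem.Str.join "\n\n" cur) (some (-oc)) none
         else PySem.Str.join "\n\n" cur)
    else
      aLoop ts oc rest groups (cur ++ [p]) (clen + PySem.Str.len p) ov

-- A's final flush after the loop (st = (groups, current_parts, overlap_prefix))
def aFinish (st : List String × List String × String) : List String :=
  if st.2.1 ≠ [] then
    st.1 ++ [PySem.Str.strip
      (if st.2.2 ≠ "" ∧ st.1 ≠ []
       then st.2.2 ++ "\n\n" ++ PySem.Str.join "\n\n" st.2.1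
       else PySem.Str.join "\n\n" st.2.1)]
  else st.1

def group_paragraphs_into_children_py (paragraphs : List String) (target_size : Int) (overlap_chars : Int) : List String :=
  if paragraphs = [] then []
  else (aFinish (aLoop target_size overlap_chars paragraphs [] [] 0 "")).filter
        (fun g => PySem.Str.strip g ≠ "")

-- ===== PORT B =====
-- B's inner while: extend the group while the next paragraph still fits
def takeGroup (ts size : Int) (acc rest : List String) : List String × List String :=
  match rest with
  | [] => (acc, [])
  | p :: rs =>
    if size + PySem.Str.len p ≤ ts then takeGroup ts (size + PySem.Str.len p) (acc ++ [p]) rs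
    else (acc, p :: rs)

-- (termination of groupsOf, cited in its decreasing_by)
lemma takeGroup_snd_length (ts : Int) : ∀ (rest : List String) (size : Int) (acc : List String),
    ((takeGroup ts size acc rest).2).length ≤ rest.length := by
  intro rest
  induction rest with
  | nil => intro size acc; simp [takeGroup]
  | cons p rs ih =>
    intro size acc
    simp only [takeGroup]
    split
    · exact Nat.le_trans (ih _ _) (Nat.le_succ _)
    · simp

-- B's outer while: cut the paragraph list into greedy contiguous groups
def groupsOf (ts : Int) : List String → List (List String)
  | [] => []
  | p :: rs =>
    (takeGroup ts (PySem.Str.len p) [p] rs).1 :: groupsOf ts (takeGroup ts (PySem.Str.len p) [p] rs).2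
termination_by l => l.length
decreasing_by
  simp only [List.length_cons]
  have := takeGroup_snd_length ts rs (PySem.Str.len p) [p]
  omega

-- B's phase 2: prepend the previous group's overlap tail (local `ov` inlined)
def phase2 (oc : Int) : List String → Option String → List String
  | [], _ => []
  | t :: rest, prev? =>
    PySem.Str.strip (match prev? with
      | none => t
      | some prev =>
        if (if PySem.Str.len prev ≤ oc then prev else PySem.Str.slice prev (some (-oc)) none) ≠ ""
        then (if PySem.Str.len prev ≤ oc then prev else PySem.Str.slice prev (some (-oc)) none) ++ "\n\n" ++ t
        else t) :: phase2 oc rest (some t)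

def group_paragraphs_into_children_py_alt (paragraphs : List String) (target_size : Int) (overlap_chars : Int) : List String :=
  if paragraphs = [] then []
  else (phase2 overlap_chars ((groupsOf target_size paragraphs).map (PySem.Str.join "\n\n")) none).filter
        (fun g => PySem.Str.strip g ≠ "")

-- ===== PRECONDITION & SPEC =====
def Spec_group_paragraphs_into_children_py (paragraphs : List String) (target_size : Int) (overlap_chars : Int) (out : List String) : Prop := out = group_paragraphs_into_children_py_alt paragraphs target_size overlap_chars
instance (paragraphs : List String) (target_size : Int) (overlap_chars : Int) (out : List String) : Decidable (Spec_group_paragraphs_into_children_py paragraphs target_size overlap_chars out) := by unfold Spec_group_paragraphs_into_children_py; infer_instance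

-- ===== CLAIM (what is proved, stated in full; the proofs are below) =====
def Claim_equal_group_paragraphs_into_children_py : Prop := ∀ (paragraphs : List String) (target_size : Int) (overlap_chars : Int), Dom_group_paragraphs_into_children_py paragraphs target_size overlap_chars → Spec_group_paragraphs_into_children_py paragraphs target_size overlap_chars (group_paragraphs_into_children_py paragraphs target_size overlap_chars)

-- ===== LEMMAS AND PROOFS =====
-- The overlap string B derives from the previous joined group (A carries it in its loop state)
def ovOf (oc : Int) : Option String → String
  | none => ""
  | some prev => if PySem.Str.len prev ≤ oc then prev else PySem.Str.slice prev (some (-oc)) none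

lemma ovOf_eq_aOv (oc : Int) (joined : String) :
    (if PySem.Str.len joined > oc then PySem.Str.slice joined (some (-oc)) none else joined)
      = ovOf oc (some joined) := by
  simp only [ovOf]
  split_ifs with h1 h2 h2 <;> first | rfl | omega

lemma groupsOf_nil (ts : Int) : groupsOf ts [] = [] := by rw [groupsOf]

lemma groupsOf_cons (ts : Int) (p : String) (rs : List String) :
    groupsOf ts (p :: rs) =
      (takeGroup ts (PySem.Str.len p) [p] rs).1 :: groupsOf ts (takeGroup ts (PySem.Str.len p) [p] rs).2 := by
  rw [groupsOf]

-- invariant: continuing A's loop from a nonempty current group equals B's grouping of the remainder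
lemma loop_eq (ts oc : Int) : ∀ (rest cur : List String) (clen : Int) (groups : List String) (prev? : Option String),
    cur ≠ [] → (prev?.isSome → groups ≠ []) →
    aFinish (aLoop ts oc rest groups cur clen (ovOf oc prev?)) =
      groups ++ phase2 oc
        (((takeGroup ts clen cur rest).1 :: groupsOf ts (takeGroup ts clen cur rest).2).map
          (PySem.Str.join "\n\n")) prev? := by
  intro rest
  induction rest with
  | nil =>
    intro cur clen groups prev? hcur hg
    simp only [aLoop, takeGroup, groupsOf_nil, List.map, phase2, aFinish]
    rw [if_pos hcur]
    cases prev? with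
    | none => simp [ovOf]
    | some prev =>
      have hgroups : groups ≠ [] := hg rfl
      simp only [ovOf]
      by_cases hov : (if PySem.Str.len prev ≤ oc then prev else PySem.Str.slice prev (some (-oc)) none) ≠ ""
      · rw [if_pos ⟨hov, hgroups⟩, if_pos hov]
      · rw [if_neg (by tauto), if_neg hov]
  | cons p rs ih =>
    intro cur clen groups prev? hcur hg
    by_cases h : clen + PySem.Str.len p > ts
    · -- flush step
      simp only [aLoop]
      rw [if_pos ⟨h, hcur⟩, ovOf_eq_aOv]
      rw [ih [p] (PySem.Str.len p) _ (some (PySem.Str.join "\n\n" cur)) (by simp) (fun _ => by simp)]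
      have htg : takeGroup ts clen cur (p :: rs) = (cur, p :: rs) := by
        simp only [takeGroup]; rw [if_neg (by omega)]
      rw [htg, groupsOf_cons]
      simp only [List.map, phase2]
      rw [List.append_assoc]
      simp only [List.singleton_append]
      cases prev? <;> simp [ovOf]
    · -- accumulate step
      simp only [aLoop]
      rw [if_neg (by tauto)]
      rw [ih (cur ++ [p]) (clen + PySem.Str.len p) groups prev? (by simp) hg]
      have htg : takeGroup ts clen cur (p :: rs) = takeGroup ts (clen + PySem.Str.len p) (cur ++ [p]) rs := by
        simp only [takeGroup]; rw [if_pos (by omega)]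
      rw [htg]

-- ===== VERDICT (by name: the statement is the Claim_ definition above) =====
theorem group_paragraphs_into_children_py_spec : Claim_equal_group_paragraphs_into_children_py := by
  intro paragraphs ts oc _
  unfold Spec_group_paragraphs_into_children_py
  unfold group_paragraphs_into_children_py group_paragraphs_into_children_py_alt
  cases paragraphs with
  | nil => rfl
  | cons p rest =>
    rw [if_neg (by simp), if_neg (by simp)]
    have h0 : aLoop ts oc (p :: rest) [] [] 0 "" = aLoop ts oc rest [] [p] (0 + PySem.Str.len p) "" := by
      simp only [aLoop]; rw [if_neg (by simp)]; simp only [List.nil_append]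
    have h1 := loop_eq ts oc rest [p] (0 + PySem.Str.len p) [] none (by simp) (by simp)
    simp only [ovOf] at h1
    rw [h0, h1, groupsOf_cons]
    rw [show (0 : Int) + PySem.Str.len p = PySem.Str.len p by omega]
    simp
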